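-- pv_equiv track=rewrite | github.com/touficfakhry/ml_iter3 | meta-classifier/url_helper.py | remove_www
-- ===== SOURCE A (Python) =====
-- def remove_www(url):
--     """
--     Removes the "www." prefix from a URL string if it exists.
--
--     Args:
--         url: The URL string.
--
--     Returns:
--         The URL string with the "www." prefix removed (if present), otherwise the original URL.
--     """
--     protocols = ["http://", "https://"]
--     for protocol in protocols:
--         if url.startswith(protocol + "www."):
--             return protocol + url[len(protocol)+4:]  # Remove "www." after protocol (length 11)
--     if url.startswith("www."):
--         return url[4:]  # Remove the first 4 characters ("www.")
--     return url
-- ===== SOURCE B (Python) =====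
-- import re
--
-- _WWW_RE = re.compile(r'^(https?://)?www\.')
--
-- def remove_www(url):
--     """
--     Removes the "www." prefix from a URL string if it exists.
--     """
--     return _WWW_RE.sub(r'\1', url)
-- ===== Notes on version B (the rewrite author's own statement) =====
-- stated objective: idiomatic
-- what changed: Replaces A's explicit loop of startswith tests and manual slicing by a single anchored regex substitution re.sub(r'^(https?://)?www\.', r'\1', url), which strips 'www.' after an optional captured scheme in one pattern-match.
import Mathlib
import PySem

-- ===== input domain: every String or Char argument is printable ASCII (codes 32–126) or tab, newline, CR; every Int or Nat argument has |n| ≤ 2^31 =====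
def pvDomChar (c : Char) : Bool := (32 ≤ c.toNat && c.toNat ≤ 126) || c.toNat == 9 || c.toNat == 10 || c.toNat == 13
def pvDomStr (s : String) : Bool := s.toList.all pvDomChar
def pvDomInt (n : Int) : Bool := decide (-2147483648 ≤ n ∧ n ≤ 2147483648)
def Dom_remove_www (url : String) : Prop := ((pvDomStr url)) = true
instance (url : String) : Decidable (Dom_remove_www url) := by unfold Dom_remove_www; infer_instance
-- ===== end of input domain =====

-- B replaces A's startswith chain by one anchored regex substitution
-- re.sub(r'^(https?://)?www\.', r'\1', url) (objective: idiomatic).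

-- ===== PORT A =====
-- the for-loop over protocols = ["http://", "https://"] is unrolled into its two iterations
def remove_www (url : String) : String :=
  if PySem.Str.startswith url ("http://" ++ "www.") then
    "http://" ++ PySem.Str.slice url (some ((7 : Int) + 4)) none
  else if PySem.Str.startswith url ("https://" ++ "www.") then
    "https://" ++ PySem.Str.slice url (some ((8 : Int) + 4)) none
  else if PySem.Str.startswith url "www." then
    PySem.Str.slice url (some 4) none
  else url

-- ===== PORT B =====
-- Source B calls re.sub with the anchored pattern ^(https?://)?www\. and replacement \1.
-- PySem has no regex, so the sub call is ported by hand, exactly as the regex engine runs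
-- this pattern: match a literal char-by-char (pvMatchLit), enumerate the backtracking
-- alternatives of the greedy optional group (https?://)? in the engine's order
-- ("https://", then "http://", then the empty group), take the first alternative after
-- which the literal "www." also matches, and replace the whole match by the captured
-- group; if no alternative matches, ^ can never match later, so the string is unchanged.
def pvMatchLit : List Char → List Char → Option (List Char)
  | [], cs => some cs
  | _ :: _, [] => none
  | l :: ls, c :: cs => if c = l then pvMatchLit ls cs else none

def pvGroupAlts (cs : List Char) : List (List Char × List Char) :=
  (match pvMatchLit "https://".toList cs with
   | some r => [("https://".toList, r)]
   | none => []) ++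
  (match pvMatchLit "http://".toList cs with
   | some r => [("http://".toList, r)]
   | none => []) ++
  [([], cs)]

def pvFirstWww : List (List Char × List Char) → Option (List Char × List Char)
  | [] => none
  | (g, r) :: alts =>
    match pvMatchLit "www.".toList r with
    | some r' => some (g, r')
    | none => pvFirstWww alts

def remove_www_alt (url : String) : String :=
  match pvFirstWww (pvGroupAlts url.toList) with
  | some (g, r) => String.ofList (g ++ r)
  | none => url

-- ===== PRECONDITION & SPEC =====
def Spec_remove_www (url : String) (out : String) : Prop := out = remove_www_alt url
instance (url : String) (out : String) : Decidable (Spec_remove_www url out) := by unfold Spec_remove_www; infer_instance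

-- ===== CLAIM (what is proved, stated in full; the proofs are below) =====
def Claim_equal_remove_www : Prop := ∀ (url : String), Dom_remove_www url → Spec_remove_www url (remove_www url)

-- ===== LEMMAS AND PROOFS =====

theorem pvMatchLit_some_iff (l : List Char) : ∀ (cs r : List Char),
    pvMatchLit l cs = some r ↔ cs = l ++ r := by
  induction l with
  | nil => intro cs r; simp [pvMatchLit]
  | cons c l ih =>
    intro cs r
    cases cs with
    | nil => simp [pvMatchLit]
    | cons d ds =>
      by_cases h : d = c <;> simp [pvMatchLit, h, ih]

theorem pvMatchLit_none_iff (l cs : List Char) :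
    pvMatchLit l cs = none ↔ ¬ l <+: cs := by
  constructor
  · rintro hn ⟨t, ht⟩
    have := (pvMatchLit_some_iff l cs t).mpr ht.symm
    rw [hn] at this; cases this
  · intro hnp
    cases o : pvMatchLit l cs with
    | none => rfl
    | some r => exact absurd ⟨r, ((pvMatchLit_some_iff l cs r).mp o).symm⟩ hnp

theorem remove_www_eq (url : String) : remove_www url = remove_www_alt url := by
  by_cases h1 : PySem.Str.startswith url ("http://" ++ "www.") = true
  · obtain ⟨r, hr⟩ : "http://www.".toList <+: url.toList := by
      have := (PySem.Chars.startswith_iff url.toList "http://www.".toList).mp (by simpa using h1)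
      simpa using this
    have hcs : url.toList = "http://www.".toList ++ r := hr.symm
    have hA : (remove_www url).toList = "http://".toList ++ r := by
      unfold remove_www; rw [if_pos h1]
      rw [String.toList_append, PySem.Str.toList_slice, PySem.Chars.slice_eq_listSlice,
          PySem.List.slice_from _ (by norm_num : (0:Int) ≤ 7 + 4), hcs]
      rfl
    have hval : pvFirstWww (pvGroupAlts url.toList) = some ("http://".toList, r) := by
      rw [hcs]; rfl
    have hB : (remove_www_alt url).toList = "http://".toList ++ r := by
      unfold remove_www_alt; rw [hval]; simp
    exact String.toList_inj.mp (hA.trans hB.symm)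
  · by_cases h2 : PySem.Str.startswith url ("https://" ++ "www.") = true
    · obtain ⟨r, hr⟩ : "https://www.".toList <+: url.toList := by
        have := (PySem.Chars.startswith_iff url.toList "https://www.".toList).mp (by simpa using h2)
        simpa using this
      have hcs : url.toList = "https://www.".toList ++ r := hr.symm
      have hA : (remove_www url).toList = "https://".toList ++ r := by
        unfold remove_www; rw [if_neg h1, if_pos h2]
        rw [String.toList_append, PySem.Str.toList_slice, PySem.Chars.slice_eq_listSlice,
            PySem.List.slice_from _ (by norm_num : (0:Int) ≤ 8 + 4), hcs]
        rfl
      have hval : pvFirstWww (pvGroupAlts url.toList) = some ("https://".toList, r) := by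
        rw [hcs]; rfl
      have hB : (remove_www_alt url).toList = "https://".toList ++ r := by
        unfold remove_www_alt; rw [hval]; simp
      exact String.toList_inj.mp (hA.trans hB.symm)
    · by_cases h3 : PySem.Str.startswith url "www." = true
      · obtain ⟨r, hr⟩ : "www.".toList <+: url.toList := by
          have := (PySem.Chars.startswith_iff url.toList "www.".toList).mp (by simpa using h3)
          simpa using this
        have hcs : url.toList = "www.".toList ++ r := hr.symm
        have hA : (remove_www url).toList = r := by
          unfold remove_www; rw [if_neg h1, if_neg h2, if_pos h3]
          rw [PySem.Str.toList_slice, PySem.Chars.slice_eq_listSlice,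
              PySem.List.slice_from _ (by norm_num : (0:Int) ≤ 4), hcs]
          rfl
        have hval : pvFirstWww (pvGroupAlts url.toList) = some ([], r) := by
          rw [hcs]; rfl
        have hB : (remove_www_alt url).toList = r := by
          unfold remove_www_alt; rw [hval]; simp
        exact String.toList_inj.mp (hA.trans hB.symm)
      · -- no alternative of the pattern matches: both return url
        have h1' : ¬ ("http://www.".toList <+: url.toList) := fun hp =>
          h1 (by rw [PySem.Str.startswith_eq]
                 exact (PySem.Chars.startswith_iff _ _).mpr (by simpa using hp))
        have h2' : ¬ ("https://www.".toList <+: url.toList) := fun hp =>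
          h2 (by rw [PySem.Str.startswith_eq]
                 exact (PySem.Chars.startswith_iff _ _).mpr (by simpa using hp))
        have h3' : ¬ ("www.".toList <+: url.toList) := fun hp =>
          h3 (by rw [PySem.Str.startswith_eq]
                 exact (PySem.Chars.startswith_iff _ _).mpr hp)
        have hA : remove_www url = url := by
          unfold remove_www; rw [if_neg h1, if_neg h2, if_neg h3]
        have hnone : pvFirstWww (pvGroupAlts url.toList) = none := by
          cases hS : pvMatchLit "https://".toList url.toList with
          | some r =>
            have hcs : url.toList = "https://".toList ++ r :=
              (pvMatchLit_some_iff _ _ _).mp hS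
            have hw : pvMatchLit "www.".toList r = none := by
              rw [pvMatchLit_none_iff]
              rintro ⟨t, ht⟩
              exact h2' ⟨t, by rw [hcs, ← ht]; rfl⟩
            rw [hcs]
            show pvFirstWww (("https://".toList, r) :: ([], "https://".toList ++ r) :: []) = none
            simp only [pvFirstWww]
            rw [hw]; rfl
          | none =>
            cases hT : pvMatchLit "http://".toList url.toList with
            | some r =>
              have hcs : url.toList = "http://".toList ++ r :=
                (pvMatchLit_some_iff _ _ _).mp hT
              have hw : pvMatchLit "www.".toList r = none := by
                rw [pvMatchLit_none_iff]
                rintro ⟨t, ht⟩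
                exact h1' ⟨t, by rw [hcs, ← ht]; rfl⟩
              rw [hcs]
              show pvFirstWww (("http://".toList, r) :: ([], "http://".toList ++ r) :: []) = none
              simp only [pvFirstWww]
              rw [hw]; rfl
            | none =>
              have h3w : pvMatchLit "www.".toList url.toList = none := by
                rw [pvMatchLit_none_iff]; exact h3'
              unfold pvGroupAlts
              rw [hS, hT]
              show pvFirstWww ([([], url.toList)]) = none
              simp only [pvFirstWww]
              rw [h3w]
        have hB : remove_www_alt url = url := by
          unfold remove_www_alt; rw [hnone]
        rw [hA, hB]

-- ===== VERDICT (by name: the statement is the Claim_ definition above) =====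
theorem remove_www_spec : Claim_equal_remove_www := by
  intro url _
  unfold Spec_remove_www
  exact remove_www_eq url
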